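-- pv_equiv track=rewrite | github.com/BrentDC-dizzy/Sambast | app.py | _is_health_advice_intent
-- ===== SOURCE A (Python) =====
-- def _is_health_advice_intent(message):
--     msg = (message or '').lower()
--     health_keywords = [
--         'sick', 'vomit', 'diarrhea', 'itch', 'allergy', 'injury', 'wound',
--         'fever', 'infection', 'pain', 'lethargic', 'not eating', 'appetite',
--         'seizure', 'blood in stool', 'medicine', 'medication', 'symptom', 'vet'
--     ]
--     return any(keyword in msg for keyword in health_keywords)
-- ===== SOURCE B (Python) =====
-- def _is_health_advice_intent(message):
--     health_keywords = [
--         'sick', 'vomit', 'diarrhea', 'itch', 'allergy', 'injury', 'wound',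
--         'fever', 'infection', 'pain', 'lethargic', 'not eating', 'appetite',
--         'seizure', 'blood in stool', 'medicine', 'medication', 'symptom', 'vet'
--     ]
--     # Single left-to-right pass, NFA-style: 'active' holds the suffixes of
--     # keywords whose matched prefix ends at the current position.
--     active = []
--     for ch in (message or ''):
--         c = ch.lower()
--         nxt = []
--         for rem in active + health_keywords:
--             if rem[0] == c:
--                 if len(rem) == 1:
--                     return True
--                 nxt.append(rem[1:])
--         active = nxt
--     return False
-- ===== Notes on version B (the rewrite author's own statement) =====
-- stated objective: alternative
-- what changed: Replaces A's keyword-major scan (one full substring search per keyword over the lowered message) by a single left-to-right NFA-style pass that carries the list of partially matched keyword suffixes and lowercases characters on the fly.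
import Mathlib
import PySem

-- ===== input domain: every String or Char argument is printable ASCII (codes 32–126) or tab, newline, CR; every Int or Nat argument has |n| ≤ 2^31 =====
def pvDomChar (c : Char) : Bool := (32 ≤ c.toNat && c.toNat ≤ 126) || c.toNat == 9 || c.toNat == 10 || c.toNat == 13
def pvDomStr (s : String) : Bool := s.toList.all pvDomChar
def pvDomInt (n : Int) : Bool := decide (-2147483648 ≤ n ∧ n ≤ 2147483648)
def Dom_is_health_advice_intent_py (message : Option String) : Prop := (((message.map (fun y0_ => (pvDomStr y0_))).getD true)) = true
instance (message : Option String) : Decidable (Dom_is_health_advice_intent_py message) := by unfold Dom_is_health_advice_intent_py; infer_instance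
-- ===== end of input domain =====

-- B replaces A's keyword-major substring scan by a single left-to-right NFA-style pass that
-- carries the set of partially matched keyword suffixes (alternative algorithm, same result).


-- ===== PORT A =====
def pvHealthKeywordsA : List String :=
  ["sick", "vomit", "diarrhea", "itch", "allergy", "injury", "wound",
   "fever", "infection", "pain", "lethargic", "not eating", "appetite",
   "seizure", "blood in stool", "medicine", "medication", "symptom", "vet"]

def is_health_advice_intent_py (message : Option String) : Bool :=
  -- msg = (message or '').lower()
  let msg := PySem.Str.lower (match message with
    | none => ""
    | some s => if s == "" then "" else s)
  -- any(keyword in msg for keyword in health_keywords)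
  pvHealthKeywordsA.any (fun keyword => PySem.Str.isIn keyword msg)

-- ===== PORT B =====
-- B's keyword list, on the list-of-chars side (strings are matched char by char)
def pvHealthKeywordsB : List (List Char) :=
  ["sick".toList, "vomit".toList, "diarrhea".toList, "itch".toList, "allergy".toList,
   "injury".toList, "wound".toList, "fever".toList, "infection".toList, "pain".toList,
   "lethargic".toList, "not eating".toList, "appetite".toList, "seizure".toList,
   "blood in stool".toList, "medicine".toList, "medication".toList, "symptom".toList,
   "vet".toList]

-- the inner 'for rem in active + health_keywords' loop body; none = 'return True'
-- (the rem = [] case is unreachable from the entry point: every rem is a nonempty keyword suffix)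
def pvInner (c : Char) : List (List Char) → Option (List (List Char))
  | [] => some []
  | rem :: rest =>
    match rem with
    | [] => pvInner c rest
    | k :: ks =>
      if k == c then
        (if ks = [] then none else (pvInner c rest).map (fun l => ks :: l))
      else pvInner c rest

-- the outer 'for ch in (message or '')' loop, threading 'active'
def pvScan : List Char → List (List Char) → Bool
  | [], _ => false
  | ch :: cs, active =>
    match pvInner (PySem.Chars.lowerChar ch) (active ++ pvHealthKeywordsB) with
    | none => true
    | some nxt => pvScan cs nxt

def is_health_advice_intent_py_alt (message : Option String) : Bool :=
  let msg := match message with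
    | none => ""
    | some s => if s == "" then "" else s
  pvScan msg.toList []

-- ===== PRECONDITION & SPEC =====
def Spec_is_health_advice_intent_py (message : Option String) (out : Bool) : Prop := out = is_health_advice_intent_py_alt message
instance (message : Option String) (out : Bool) : Decidable (Spec_is_health_advice_intent_py message out) := by unfold Spec_is_health_advice_intent_py; infer_instance

-- ===== CLAIM (what is proved, stated in full; the proofs are below) =====
def Claim_equal_is_health_advice_intent_py : Prop := ∀ (message : Option String), Dom_is_health_advice_intent_py message → Spec_is_health_advice_intent_py message (is_health_advice_intent_py message)

-- ===== LEMMAS AND PROOFS =====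

-- one NFA step as a pure function: advance each nonempty suffix whose head is c
def pvAdv (c : Char) (rems : List (List Char)) : List (List Char) :=
  rems.filterMap (fun rem => match rem with
    | [] => none
    | k :: ks => if k == c then (if ks = [] then none else some ks) else none)

theorem pvInner_eq (c : Char) (rems : List (List Char)) :
    pvInner c rems = if [c] ∈ rems then none else some (pvAdv c rems) := by
  induction rems with
  | nil => simp [pvInner, pvAdv]
  | cons rem rest ih =>
    match rem with
    | [] => simp [pvInner, pvAdv, ih]
    | k :: ks =>
      by_cases hk : k = c
      · subst hk
        by_cases hks : ks = []
        · subst hks; simp [pvInner]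
        · have hun : pvInner k ((k :: ks) :: rest) = (pvInner k rest).map (fun l => ks :: l) := by
            simp [pvInner, hks]
          have had : pvAdv k ((k :: ks) :: rest) = ks :: pvAdv k rest := by
            simp [pvAdv, hks]
          have hmm : ([k] ∈ (k :: ks) :: rest) ↔ [k] ∈ rest := by
            simp [List.mem_cons, hks, eq_comm]
          rw [hun, ih, had, if_congr hmm rfl rfl]
          by_cases hm : [k] ∈ rest <;> simp [hm]
      · have hne2 : ¬(c = k ∧ ks = []) := fun h => hk h.1.symm
        simp only [pvInner, pvAdv, ih, beq_iff_eq, hk, if_false, List.filterMap_cons,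
          List.mem_cons, List.cons_eq_cons]
        split_ifs with h1 h2 <;> simp_all

theorem mem_pvAdv (c : Char) (rems : List (List Char)) (r : List Char) :
    r ∈ pvAdv c rems ↔ r ≠ [] ∧ c :: r ∈ rems := by
  simp only [pvAdv, List.mem_filterMap]
  constructor
  · rintro ⟨rem, hmem, hr⟩
    match rem with
    | [] => simp at hr
    | k :: ks =>
      by_cases h1 : k == c
      · by_cases h2 : ks = []
        · simp [h1, h2] at hr
        · simp only [h1, h2, if_true, if_false, Option.some_inj] at hr
          exact ⟨by rw [← hr]; exact h2, by rw [← hr, ← beq_iff_eq.mp h1]; exact hmem⟩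
      · simp [h1] at hr
  · rintro ⟨hne, hmem⟩
    exact ⟨c :: r, hmem, by simp [hne]⟩

theorem prefix_cons_iff (r : List Char) (c : Char) (t : List Char) (hne : r ≠ []) (hnc : r ≠ [c]) :
    r <+: c :: t ↔ ∃ r', r = c :: r' ∧ r' ≠ [] ∧ r' <+: t := by
  match r with
  | [] => simp at hne
  | k :: ks =>
    constructor
    · intro h
      rw [List.cons_prefix_cons] at h
      obtain ⟨hk, hks⟩ := h
      subst hk
      refine ⟨ks, rfl, ?_, hks⟩
      intro hnil; exact hnc (by simp [hnil])
    · rintro ⟨r', hr, _, hp⟩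
      rw [hr, List.cons_prefix_cons]
      exact ⟨rfl, hp⟩

theorem isIn_cons_iff (kw : List Char) (c : Char) (t : List Char) :
    PySem.Chars.isIn kw (c :: t) = true ↔ kw <+: c :: t ∨ PySem.Chars.isIn kw t = true := by
  rw [← PySem.Chars.exists_prefix_drop_iff_isIn, ← PySem.Chars.exists_prefix_drop_iff_isIn]
  constructor
  · rintro ⟨j, hj⟩
    match j with
    | 0 => exact Or.inl hj
    | j + 1 => exact Or.inr ⟨j, by simpa using hj⟩
  · rintro (h | ⟨j, hj⟩)
    · exact ⟨0, h⟩
    · exact ⟨j + 1, by simpa using hj⟩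

theorem keywordsB_nonempty : ∀ kw ∈ pvHealthKeywordsB, kw ≠ [] := by decide

-- the loop invariant: pvScan succeeds iff some carried suffix completes in cs,
-- or some keyword occurs as a substring of the lowered remainder
theorem pvScan_iff (cs : List Char) (active : List (List Char))
    (hne : ∀ rem ∈ active, rem ≠ []) :
    pvScan cs active = true ↔
      (∃ rem ∈ active, rem <+: PySem.Chars.lower cs) ∨
      (∃ kw ∈ pvHealthKeywordsB, PySem.Chars.isIn kw (PySem.Chars.lower cs) = true) := by
  induction cs generalizing active with
  | nil =>
    simp only [pvScan, PySem.Chars.lower, List.map_nil]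
    constructor
    · intro h; simp at h
    · rintro (⟨rem, hmem, hp⟩ | ⟨kw, hmem, hin⟩)
      · exact absurd (List.prefix_nil.mp hp) (hne rem hmem)
      · rw [PySem.Chars.isIn_iff_infix] at hin
        exact absurd (List.infix_nil.mp hin) (keywordsB_nonempty kw hmem)
  | cons ch cs ih =>
    have hL : PySem.Chars.lower (ch :: cs) = PySem.Chars.lowerChar ch :: PySem.Chars.lower cs := rfl
    rw [hL]
    by_cases hmem : [PySem.Chars.lowerChar ch] ∈ active ++ pvHealthKeywordsB
    · have hscan : pvScan (ch :: cs) active = true := by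
        simp only [pvScan]
        rw [pvInner_eq, if_pos hmem]
      rw [hscan]
      simp only [true_iff]
      rcases List.mem_append.mp hmem with h | h
      · exact Or.inl ⟨[PySem.Chars.lowerChar ch], h, ⟨_, rfl⟩⟩
      · refine Or.inr ⟨[PySem.Chars.lowerChar ch], h, ?_⟩
        rw [PySem.Chars.isIn_iff_infix]
        exact List.IsPrefix.isInfix ⟨_, rfl⟩
    · have hscan : pvScan (ch :: cs) active
          = pvScan cs (pvAdv (PySem.Chars.lowerChar ch) (active ++ pvHealthKeywordsB)) := by
        simp only [pvScan]
        rw [pvInner_eq, if_neg hmem]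
      rw [hscan, ih _ (fun rem hr => (mem_pvAdv _ _ _ |>.mp hr).1)]
      constructor
      · rintro (⟨rem, hr, hp⟩ | ⟨kw, hk, hin⟩)
        · obtain ⟨hrne, hcr⟩ := mem_pvAdv _ _ rem |>.mp hr
          rcases List.mem_append.mp hcr with h | h
          · exact Or.inl ⟨_, h, List.cons_prefix_cons.mpr ⟨rfl, hp⟩⟩
          · exact Or.inr ⟨_, h, (isIn_cons_iff _ _ _).mpr (Or.inl (List.cons_prefix_cons.mpr ⟨rfl, hp⟩))⟩
        · exact Or.inr ⟨kw, hk, (isIn_cons_iff _ _ _).mpr (Or.inr hin)⟩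
      · rintro (⟨rem, hr, hp⟩ | ⟨kw, hk, hin⟩)
        · have hnc : rem ≠ [PySem.Chars.lowerChar ch] := fun h => hmem (h ▸ List.mem_append_left _ hr)
          obtain ⟨r', hreq, hr'ne, hp'⟩ := (prefix_cons_iff rem _ _ (hne rem hr) hnc).mp hp
          exact Or.inl ⟨r', (mem_pvAdv _ _ _).mpr ⟨hr'ne, hreq ▸ List.mem_append_left _ hr⟩, hp'⟩
        · rcases (isIn_cons_iff _ _ _).mp hin with hpre | htail
          · have hnc : kw ≠ [PySem.Chars.lowerChar ch] := fun h => hmem (h ▸ List.mem_append_right _ hk)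
            obtain ⟨r', hreq, hr'ne, hp'⟩ := (prefix_cons_iff kw _ _ (keywordsB_nonempty kw hk) hnc).mp hpre
            exact Or.inl ⟨r', (mem_pvAdv _ _ _).mpr ⟨hr'ne, hreq ▸ List.mem_append_right _ hk⟩, hp'⟩
          · exact Or.inr ⟨kw, hk, htail⟩

theorem keywordsB_eq_map : pvHealthKeywordsB = pvHealthKeywordsA.map String.toList := by decide

theorem main_eq (s : String) :
    pvHealthKeywordsA.any (fun keyword => PySem.Str.isIn keyword (PySem.Str.lower s))
      = pvScan s.toList [] := by
  rw [Bool.eq_iff_iff, pvScan_iff s.toList [] (by simp)]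
  simp only [List.any_eq_true, List.mem_nil_iff, false_and, exists_false, false_or,
    keywordsB_eq_map, List.mem_map]
  constructor
  · rintro ⟨kw, hk, hin⟩
    refine ⟨kw.toList, ⟨kw, hk, rfl⟩, ?_⟩
    have : (PySem.Str.lower s).toList = PySem.Chars.lower s.toList := by simp [pysem]
    rw [PySem.Str.isIn_iff_infix, this] at hin
    rw [PySem.Chars.isIn_iff_infix]
    exact hin
  · rintro ⟨_, ⟨kw, hk, rfl⟩, hin⟩
    refine ⟨kw, hk, ?_⟩
    have : (PySem.Str.lower s).toList = PySem.Chars.lower s.toList := by simp [pysem]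
    rw [PySem.Str.isIn_iff_infix, this]
    rw [PySem.Chars.isIn_iff_infix] at hin
    exact hin

-- ===== VERDICT (by name: the statement is the Claim_ definition above) =====
theorem is_health_advice_intent_py_spec : Claim_equal_is_health_advice_intent_py := by
  intro message _
  unfold Spec_is_health_advice_intent_py is_health_advice_intent_py is_health_advice_intent_py_alt
  cases message with
  | none => decide
  | some s => exact main_eq _
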